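-- pv_equiv track=rewrite | github.com/Mps24-7uk/R2plus1d | dataloader.py | _fix_length_reflect
-- ===== SOURCE A (Python) =====
-- from typing import List, Tuple
--
-- def _fix_length_reflect(frame_files: List[str], target_len: int) -> List[str]:
--     """Reflect-pad/truncate a list of frame paths to target_len."""
--     n = len(frame_files)
--     if n == target_len:
--         return frame_files
--     if n > target_len:
--         return frame_files[:target_len]
--
--     # Reflect pad: e.g., [0,1,2,3] -> extend with [2,1] [2,1] ...
--     out = frame_files[:]
--     if n == 1:
--         # Single frame: just repeat it
--         while len(out) < target_len:
--             out.append(frame_files[0])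
--         return out
--
--     mirror_idx = list(range(n - 2, 0, -1))  # exclude endpoints
--     while len(out) < target_len:
--         for j in mirror_idx:
--             out.append(frame_files[j])
--             if len(out) >= target_len:
--                 break
--     return out
-- ===== SOURCE B (Python) =====
-- from typing import List
--
-- def _fix_length_reflect(frame_files: List[str], target_len: int) -> List[str]:
--     """Reflect-pad/truncate a list of frame paths to target_len."""
--     n = len(frame_files)
--     if n == target_len:
--         return frame_files
--     if n > target_len:
--         return frame_files[:target_len]
--     if n == 1:
--         return frame_files * target_len
--     block = frame_files[1:-1][::-1]
--     pad = target_len - n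
--     return frame_files + (block * (pad // len(block) + 1))[:pad]
-- ===== Notes on version B (the rewrite author's own statement) =====
-- stated objective: simpler
-- what changed: A grows the output with a nested while/for/break loop appending one mirrored frame at a time; B builds the mirror block once and produces the whole padding arithmetically as (block * (pad // len(block) + 1))[:pad].
import Mathlib
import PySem

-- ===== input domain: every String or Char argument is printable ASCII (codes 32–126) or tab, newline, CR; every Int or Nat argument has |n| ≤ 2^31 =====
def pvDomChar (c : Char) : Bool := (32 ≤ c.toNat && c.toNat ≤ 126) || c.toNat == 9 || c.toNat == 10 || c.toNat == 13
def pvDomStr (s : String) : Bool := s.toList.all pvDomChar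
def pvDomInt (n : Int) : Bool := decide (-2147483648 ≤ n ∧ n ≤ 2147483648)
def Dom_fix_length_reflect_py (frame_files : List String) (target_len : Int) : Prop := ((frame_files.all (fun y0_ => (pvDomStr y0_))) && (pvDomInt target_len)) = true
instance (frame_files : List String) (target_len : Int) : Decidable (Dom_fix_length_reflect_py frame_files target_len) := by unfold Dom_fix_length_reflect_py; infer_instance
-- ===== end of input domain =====

-- B replaces A's grow-and-test while/for/break padding loops by building the mirror block
-- once and producing the whole pad by arithmetic repetition + slice (objective: simpler).

-- ===== PORT A =====
-- 'while len(out) < target_len: out.append(frame_files[0])' (n == 1 branch);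
-- the fuel argument only makes the recursion total, each live step is one append.
def pvARepeat (x : String) (target_len : Int) : Nat → List String → List String
  | 0, out => out
  | fuel + 1, out =>
      if (out.length : Int) < target_len then pvARepeat x target_len fuel (out ++ [x])
      else out

-- the inner 'for j in mirror_idx: out.append(frame_files[j]); if len(out) >= target_len: break'
-- (frame_files[j] with j always in range 1..n-2; the .pyGetD default "" is never used)
def pvAInner (frame_files : List String) (target_len : Int) : List Int → List String → List String
  | [], out => out
  | j :: js, out =>
      let out' := out ++ [PySem.List.pyGetD frame_files j ""]
      if target_len ≤ (out'.length : Int) then out'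
      else pvAInner frame_files target_len js out'

-- the outer 'while len(out) < target_len' loop; the fuel argument only makes it total
def pvALoop (frame_files : List String) (target_len : Int) (mirror_idx : List Int) : Nat → List String → List String
  | 0, out => out
  | fuel + 1, out =>
      if (out.length : Int) < target_len then
        pvALoop frame_files target_len mirror_idx fuel (pvAInner frame_files target_len mirror_idx out)
      else out

def fix_length_reflect_py (frame_files : List String) (target_len : Int) : List String :=
  let n : Int := frame_files.length
  if n = target_len then frame_files
  else if n > target_len then PySem.List.slice frame_files none (some target_len)
  else if n = 1 then
    pvARepeat (PySem.List.pyGetD frame_files 0 "") target_len target_len.toNat frame_files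
  else
    let mirror_idx := PySem.List.pyRange (n - 2) 0 (-1)
    pvALoop frame_files target_len mirror_idx target_len.toNat frame_files

-- ===== PORT B =====
def fix_length_reflect_py_alt (frame_files : List String) (target_len : Int) : List String :=
  let n : Int := frame_files.length
  if n = target_len then frame_files
  else if n > target_len then PySem.List.slice frame_files none (some target_len)
  else if n = 1 then PySem.List.pyRepeat frame_files target_len
  else
    -- block = frame_files[1:-1][::-1]  (a step -1 slice never raises; the .getD [] default is never used)
    let block := (PySem.List.slice? (PySem.List.slice frame_files (some 1) (some (-1))) none none (-1)).getD []
    let pad := target_len - n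
    frame_files ++
      PySem.List.slice (PySem.List.pyRepeat block (PySem.Int.floordiv pad (block.length : Int) + 1)) none (some pad)

-- ===== PRECONDITION & SPEC =====
-- Pre_ excludes exactly the inputs on which A never returns: with 0 or 2 frames and a larger
-- target the mirror block is empty, so A's while loop runs forever (and B raises ZeroDivisionError).
def Pre_fix_length_reflect_py (frame_files : List String) (target_len : Int) : Prop :=
  ¬ ((frame_files.length : Int) < target_len ∧ (frame_files.length = 0 ∨ frame_files.length = 2))
instance (frame_files : List String) (target_len : Int) : Decidable (Pre_fix_length_reflect_py frame_files target_len) := by unfold Pre_fix_length_reflect_py; infer_instance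

def pvWitness_fix_length_reflect_py : List String × Int := (["a", "b", "c"], 7)

def Spec_fix_length_reflect_py (frame_files : List String) (target_len : Int) (out : List String) : Prop := out = fix_length_reflect_py_alt frame_files target_len
instance (frame_files : List String) (target_len : Int) (out : List String) : Decidable (Spec_fix_length_reflect_py frame_files target_len out) := by unfold Spec_fix_length_reflect_py; infer_instance

-- ===== CLAIM (what is proved, stated in full; the proofs are below) =====
def Claim_equal_fix_length_reflect_py : Prop := ∀ (frame_files : List String) (target_len : Int), Dom_fix_length_reflect_py frame_files target_len → Pre_fix_length_reflect_py frame_files target_len → Spec_fix_length_reflect_py frame_files target_len (fix_length_reflect_py frame_files target_len)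

-- ===== LEMMAS AND PROOFS =====

theorem pvARepeat_eq (x : String) (t : Int) :
    ∀ (fuel : Nat) (out : List String), (t - out.length).toNat ≤ fuel →
      pvARepeat x t fuel out = out ++ List.replicate (t - out.length).toNat x := by
  intro fuel
  induction fuel with
  | zero =>
    intro out h
    have : (t - out.length).toNat = 0 := by omega
    simp [pvARepeat, this]
  | succ fuel ih =>
    intro out h
    by_cases hlt : (out.length : Int) < t
    · have h1 : (t - ((out ++ [x]).length : Int)).toNat ≤ fuel := by simp; omega
      have := ih (out ++ [x]) h1
      simp only [pvARepeat, if_pos hlt, this]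
      have h2 : (t - out.length).toNat = (t - ((out ++ [x]).length : Int)).toNat + 1 := by
        simp; omega
      rw [h2, List.replicate_succ]
      simp
    · have : (t - out.length).toNat = 0 := by omega
      simp [pvARepeat, if_neg hlt, this]

theorem pvAInner_eq (ff : List String) (t : Int) :
    ∀ (js : List Int) (out : List String), (out.length : Int) < t →
      pvAInner ff t js out
        = out ++ (js.map (fun j => PySem.List.pyGetD ff j "")).take (t - out.length).toNat := by
  intro js
  induction js with
  | nil => intro out h; simp [pvAInner]
  | cons j js ih =>
    intro out h
    simp only [pvAInner, List.map_cons]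
    by_cases hend : t ≤ ((out ++ [PySem.List.pyGetD ff j ""]).length : Int)
    · rw [if_pos hend]
      have h1 : (t - out.length).toNat = 1 := by simp at hend; omega
      simp [h1]
    · rw [if_neg hend]
      rw [ih _ (by simp at hend ⊢; omega)]
      have h2 : (t - out.length).toNat
          = (t - ((out ++ [PySem.List.pyGetD ff j ""]).length : Int)).toNat + 1 := by
        simp at hend ⊢; omega
      rw [h2, List.take_succ_cons]
      simp

theorem pvALoop_eq (ff : List String) (t : Int) (mirror : List Int)
    (hB : (mirror.map (fun j => PySem.List.pyGetD ff j "")) ≠ []) :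
    ∀ (fuel : Nat) (out : List String),
      (t - out.length).toNat ≤ fuel * (mirror.map (fun j => PySem.List.pyGetD ff j "")).length →
      pvALoop ff t mirror fuel out
        = out ++ ((List.replicate fuel (mirror.map (fun j => PySem.List.pyGetD ff j ""))).flatten).take (t - out.length).toNat := by
  set B := mirror.map (fun j => PySem.List.pyGetD ff j "") with hBdef
  have hBlen : 0 < B.length := List.length_pos_iff.mpr hB
  intro fuel
  induction fuel with
  | zero =>
    intro out h
    have : (t - out.length).toNat = 0 := by omega
    simp [pvALoop, this]
  | succ fuel ih =>
    intro out h
    by_cases hlt : (out.length : Int) < t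
    · simp only [pvALoop, if_pos hlt]
      rw [pvAInner_eq ff t mirror out hlt, ← hBdef]
      set out' := out ++ B.take (t - out.length).toNat with hout'
      have hlen' : out'.length = out.length + min (t - out.length).toNat B.length := by
        simp [hout']
      by_cases hfill : (t - out.length).toNat ≤ B.length
      · -- this inner pass reached the target: the loop exits on the next test
        have hstop : ¬ ((out'.length : Int) < t) := by
          rw [hlen']; push_cast; omega
        have hstep : pvALoop ff t mirror fuel out' = out' := by
          cases fuel <;> simp [pvALoop, hstop]
        rw [hstep, hout', List.replicate_succ, List.flatten_cons, List.take_append]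
        simp; omega
      · -- this inner pass appended the whole block; recurse
        have hall : B.take (t - out.length).toNat = B := List.take_of_length_le (by omega)
        have hlen2 : out'.length = out.length + B.length := by rw [hlen']; omega
        have hmul : (fuel + 1) * B.length = fuel * B.length + B.length := Nat.succ_mul _ _
        rw [hmul] at h
        have ihh := ih out' (by rw [hlen2]; omega)
        have hsub : (t - ((out ++ B).length : Int)).toNat = (t - out.length).toNat - B.length := by
          simp; omega
        rw [ihh, hout', hall, List.replicate_succ, List.flatten_cons, List.take_append, hall, hsub,
            List.append_assoc]
    · have : (t - out.length).toNat = 0 := by omega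
      simp [pvALoop, if_neg hlt, this]

-- a prefix of a cyclic repetition does not depend on how many copies were laid down, given enough
theorem pvCycle_take_le (B : List String) (p k k' : Nat) (hle : k ≤ k')
    (hk : p ≤ k * B.length) :
    ((List.replicate k B).flatten).take p = ((List.replicate k' B).flatten).take p := by
  have h : List.replicate k' B = List.replicate k B ++ List.replicate (k' - k) B := by
    rw [← List.replicate_add]; congr 1; omega
  rw [h, List.flatten_append, List.take_append]
  have hlen : ((List.replicate k B).flatten).length = k * B.length := by simp [Nat.mul_comm]
  simp; omega

theorem pvCycle_take (B : List String) (p k k' : Nat)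
    (hk : p ≤ k * B.length) (hk' : p ≤ k' * B.length) :
    ((List.replicate k B).flatten).take p = ((List.replicate k' B).flatten).take p := by
  rcases Nat.le_total k k' with h | h
  · exact pvCycle_take_le B p k k' h hk
  · exact (pvCycle_take_le B p k' k h hk').symm

-- frame_files[1:-1] for a list of at least 3 elements
theorem pvSliceMid (ff : List String) (h : 3 ≤ ff.length) :
    PySem.List.slice ff (some 1) (some (-1)) = (ff.drop 1).take (ff.length - 2) := by
  have hne : ff ≠ [] := by intro e; rw [e] at h; simp at h
  simp only [PySem.List.slice, PySem.List.clampIdx]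
  norm_num [hne]
  have h1 : min 1 ff.length = 1 := by omega
  rw [h1, List.drop_one]
  congr 1
  omega

-- the values A's mirror_idx walk reads are exactly B's block
theorem pvMirrorVals (ff : List String) (h : 3 ≤ ff.length) :
    (PySem.List.pyRange ((ff.length : Int) - 2) 0 (-1)).map (fun j => PySem.List.pyGetD ff j "")
      = ((ff.drop 1).take (ff.length - 2)).reverse := by
  rw [PySem.List.pyRange_neg_one_eq_reverse, List.map_reverse]
  congr 1
  apply List.ext_getElem
  · simp [PySem.List.length_pyRange_one]; omega
  · intro i h1 h2
    simp only [List.getElem_map]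
    rw [PySem.List.getElem_pyRange_one]
    have hi : i < ff.length - 2 := by
      simp [PySem.List.length_pyRange_one] at h1; omega
    rw [PySem.List.pyGetD_eq_getElem ff "" (by push_cast; omega) (by push_cast; omega)]
    simp [List.getElem_take]
    congr 1
    omega

theorem pvMain : ∀ (frame_files : List String) (target_len : Int), Pre_fix_length_reflect_py frame_files target_len → Spec_fix_length_reflect_py frame_files target_len (fix_length_reflect_py frame_files target_len) := by
  intro ff t hpre
  unfold Spec_fix_length_reflect_py fix_length_reflect_py fix_length_reflect_py_alt
  by_cases h1 : (ff.length : Int) = t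
  · simp [h1]
  · by_cases h2 : (ff.length : Int) > t
    · simp [h1, h2]
    · by_cases h3 : (ff.length : Int) = 1
      · -- single frame: A repeats it one by one, B multiplies the list
        simp only [h1, h2, h3, if_false, if_true, if_neg, if_pos]
        obtain ⟨x, hx⟩ := List.length_eq_one_iff.mp (by exact_mod_cast h3)
        subst hx
        have ht : 1 < t := by omega
        rw [PySem.List.pyGetD_eq_getElem _ "" (by omega) (by simp),
            PySem.List.pyRepeat_singleton,
            pvARepeat_eq _ t t.toNat [x] (by simp; try omega)]
        have h4 : t.toNat = (t - (([x] : List String).length : Int)).toNat + 1 := by simp; omega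
        rw [h4, List.replicate_succ]
        simp
      · -- general reflect-pad: n ≥ 3 inside Pre_
        have hn3 : 3 ≤ ff.length := by
          unfold Pre_fix_length_reflect_py at hpre
          push_neg at hpre
          omega
        simp only [h1, h2, h3, if_false, if_neg, if_pos,
          PySem.List.slice?_none_none_neg_one, Option.getD_some, pvSliceMid ff hn3]
        set blockB := ((ff.drop 1).take (ff.length - 2)).reverse with hblock
        have hL : blockB.length = ff.length - 2 := by simp [hblock]; omega
        have hLpos : 0 < blockB.length := by omega
        have hmirror := pvMirrorVals ff hn3
        rw [← hblock] at hmirror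
        have hfuel : (t - (ff.length : Int)).toNat
            ≤ t.toNat * ((PySem.List.pyRange ((ff.length : Int) - 2) 0 (-1)).map
                (fun j => PySem.List.pyGetD ff j "")).length := by
          rw [hmirror]
          have := Nat.le_mul_of_pos_right t.toNat hLpos
          omega
        rw [pvALoop_eq ff t _ (by rw [hmirror]; intro e; rw [e] at hLpos; simp at hLpos)
              t.toNat ff hfuel, hmirror]
        congr 1
        -- B side: pyRepeat is flatten ∘ replicate, the slice is a take
        have hpad : (0:Int) ≤ t - (ff.length : Int) := by omega
        rw [PySem.List.slice_to _ hpad]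
        show ((List.replicate t.toNat blockB).flatten).take (t - (ff.length : Int)).toNat
          = ((List.replicate (PySem.Int.floordiv (t - (ff.length : Int)) (blockB.length : Int) + 1).toNat blockB).flatten).take (t - (ff.length : Int)).toNat
        set P := (t - (ff.length : Int)).toNat with hP
        have hPint : (t - (ff.length : Int)) = (P : Int) := by omega
        rw [hPint, PySem.Int.floordiv_natCast]
        have hk' : ((P / blockB.length : Nat) : Int) + 1 = (((P / blockB.length + 1 : Nat)) : Int) := by
          push_cast; ring
        rw [hk', Int.toNat_natCast]
        apply pvCycle_take
        · have := Nat.le_mul_of_pos_right t.toNat hLpos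
          omega
        · have hdm := Nat.div_add_mod P blockB.length
          have hmlt := Nat.mod_lt P hLpos
          have hsm : (P / blockB.length + 1) * blockB.length
              = P / blockB.length * blockB.length + blockB.length := Nat.succ_mul _ _
          have hmm : blockB.length * (P / blockB.length)
              = P / blockB.length * blockB.length := Nat.mul_comm _ _
          omega

-- ===== VERDICT (by name: the statement is the Claim_ definition above) =====
theorem fix_length_reflect_py_spec : Claim_equal_fix_length_reflect_py :=
  fun ff t _dom hpre => pvMain ff t hpre
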